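-- pv_equiv track=rewrite | github.com/luisfpatrocinio/beecrowd | bee_1159.py | soma_pares_consecutivos
-- ===== SOURCE A (Python) =====
-- def soma_pares_consecutivos(x):
--     if x % 2 != 0:
--         x += 1  # Ajusta para o próximo número par se x for ímpar
--     soma = 0
--     for _ in range(5):
--         soma += x
--         x += 2  # Avança para o próximo número par
--     return soma
-- ===== SOURCE B (Python) =====
-- def soma_pares_consecutivos(x):
--     if x % 2 != 0:
--         x += 1
--     return 5 * x + 20
-- ===== Notes on version B (the rewrite author's own statement) =====
-- stated objective: simpler
-- what changed: Replaces the five-iteration accumulation loop with a single closed-form arithmetic expression on the parity-adjusted input.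
import Mathlib
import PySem

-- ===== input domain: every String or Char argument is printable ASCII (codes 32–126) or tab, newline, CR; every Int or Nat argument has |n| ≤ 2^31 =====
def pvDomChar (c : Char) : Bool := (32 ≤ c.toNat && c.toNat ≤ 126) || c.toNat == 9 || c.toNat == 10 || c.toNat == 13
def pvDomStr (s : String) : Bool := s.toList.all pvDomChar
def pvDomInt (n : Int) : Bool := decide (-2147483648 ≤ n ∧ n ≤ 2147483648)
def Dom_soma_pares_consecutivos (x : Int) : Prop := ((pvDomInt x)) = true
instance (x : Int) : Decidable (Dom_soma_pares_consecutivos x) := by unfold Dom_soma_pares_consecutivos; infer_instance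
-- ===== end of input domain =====

-- B replaces A's five-iteration accumulation loop with the closed-form sum 5*x + 20 (simpler).


-- ===== PORT A =====
def soma_pares_consecutivos (x : Int) : Int :=
  let x := if PySem.Int.mod x 2 ≠ 0 then x + 1 else x
  let p := (List.range 5).foldl (fun (st : Int × Int) _ => (st.1 + st.2, st.2 + 2)) (0, x)
  p.1

-- ===== PORT B =====
def soma_pares_consecutivos_alt (x : Int) : Int :=
  let x := if PySem.Int.mod x 2 ≠ 0 then x + 1 else x
  5 * x + 20

-- ===== PRECONDITION & SPEC =====
def Spec_soma_pares_consecutivos (x : Int) (out : Int) : Prop := out = soma_pares_consecutivos_alt x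
instance (x : Int) (out : Int) : Decidable (Spec_soma_pares_consecutivos x out) := by unfold Spec_soma_pares_consecutivos; infer_instance

-- ===== CLAIM (what is proved, stated in full; the proofs are below) =====
def Claim_equal_soma_pares_consecutivos : Prop := ∀ (x : Int), Dom_soma_pares_consecutivos x → Spec_soma_pares_consecutivos x (soma_pares_consecutivos x)

-- ===== LEMMAS AND PROOFS =====

-- ===== VERDICT (by name: the statement is the Claim_ definition above) =====
theorem soma_pares_consecutivos_spec : Claim_equal_soma_pares_consecutivos := by
  intro x _
  unfold Spec_soma_pares_consecutivos soma_pares_consecutivos soma_pares_consecutivos_alt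
  simp [List.range_succ]
  split_ifs <;> ring
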